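-- pv_equiv track=rewrite | github.com/nicolabaldassar/nonogram | rules.py | extract_groups
-- ===== SOURCE A (Python) =====
-- def extract_groups(line:list) -> list:
--     groups = []
--     count = 0
--
--     for cell in line:
--         if cell == 1:
--             count += 1
--         elif count > 0:
--             groups.append(count)
--             count = 0
--
--     if count > 0:
--         groups.append(count)
--
--     return groups
-- ===== SOURCE B (Python) =====
-- from itertools import groupby
--
-- def extract_groups(line: list) -> list:
--     return [sum(1 for _ in g) for k, g in groupby(line) if k == 1]
-- ===== Notes on version B (the rewrite author's own statement) =====
-- stated objective: idiomatic
-- what changed: Replaced the explicit running-counter state machine with itertools.groupby: partition the line into maximal runs of equal elements, then emit the length of each run whose key is 1.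
import Mathlib
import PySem

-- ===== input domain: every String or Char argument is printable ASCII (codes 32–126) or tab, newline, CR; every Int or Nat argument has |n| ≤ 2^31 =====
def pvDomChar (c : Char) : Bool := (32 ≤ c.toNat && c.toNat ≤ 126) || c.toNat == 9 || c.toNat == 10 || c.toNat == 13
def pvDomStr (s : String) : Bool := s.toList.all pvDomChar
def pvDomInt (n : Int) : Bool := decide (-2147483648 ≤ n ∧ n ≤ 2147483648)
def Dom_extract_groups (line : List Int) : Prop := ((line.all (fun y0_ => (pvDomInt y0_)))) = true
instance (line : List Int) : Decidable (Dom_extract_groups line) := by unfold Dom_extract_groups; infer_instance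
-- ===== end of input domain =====

-- B replaces A's running-counter state machine with a groupby-style run-length pass (idiomatic; same O(n) cost).


-- ===== PORT A =====
def pvALoop : List Int → List Int → Int → List Int
  | [], groups, count => if count > 0 then groups ++ [count] else groups
  | cell :: rest, groups, count =>
    if cell = 1 then pvALoop rest groups (count + 1)
    else if count > 0 then pvALoop rest (groups ++ [count]) 0
    else pvALoop rest groups count

def extract_groups (line : List Int) : List Int := pvALoop line [] 0

-- ===== PORT B =====
-- itertools.groupby: maximal runs of equal consecutive elements as (key, run length)
def pvGroupRuns : List Int → List (Int × Int)
  | [] => []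
  | x :: xs =>
    (x, 1 + ((xs.takeWhile (· == x)).length : Int)) :: pvGroupRuns (xs.dropWhile (· == x))
termination_by l => l.length
decreasing_by
  simp only [List.length_cons]
  exact Nat.lt_succ_of_le (List.length_dropWhile_le _ _)

-- the comprehension: lengths of the groups whose key equals 1
def extract_groups_alt (line : List Int) : List Int :=
  (pvGroupRuns line).filterMap (fun p => if p.1 == 1 then some p.2 else none)

-- ===== PRECONDITION & SPEC =====
def Spec_extract_groups (line : List Int) (out : List Int) : Prop := out = extract_groups_alt line
instance (line : List Int) (out : List Int) : Decidable (Spec_extract_groups line out) := by unfold Spec_extract_groups; infer_instance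

-- ===== CLAIM (what is proved, stated in full; the proofs are below) =====
def Claim_equal_extract_groups : Prop := ∀ (line : List Int), Dom_extract_groups line → Spec_extract_groups line (extract_groups line)

-- ===== LEMMAS AND PROOFS =====

lemma pvDropWhile_head_false {p : Int → Bool} {l : List Int} {z : Int} {r : List Int}
    (h : l.dropWhile p = z :: r) : p z = false := by
  induction l with
  | nil => simp at h
  | cons y ys ih =>
    by_cases hy : p y
    · rw [List.dropWhile_cons_of_pos hy] at h; exact ih h
    · rw [List.dropWhile_cons_of_neg hy] at h
      cases h; simpa using hy

lemma pvEmit_dropWhile (x : Int) (hx : x ≠ 1) (xs : List Int) :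
    (pvGroupRuns (xs.dropWhile (· == x))).filterMap
        (fun p => if p.1 == 1 then some p.2 else none)
      = (pvGroupRuns xs).filterMap (fun p => if p.1 == 1 then some p.2 else none) := by
  cases xs with
  | nil => rfl
  | cons y ys =>
    by_cases hy : (y == x) = true
    · have hyx : y = x := by simpa using hy
      subst hyx
      conv_rhs => rw [pvGroupRuns]
      rw [List.filterMap_cons]
      simp [hx]
    · simp only [List.dropWhile_cons, hy, Bool.false_eq_true, if_false]

lemma pvEmit_skip (x : Int) (hx : x ≠ 1) (xs : List Int) :
    (pvGroupRuns (x :: xs)).filterMap (fun p => if p.1 == 1 then some p.2 else none)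
      = (pvGroupRuns xs).filterMap (fun p => if p.1 == 1 then some p.2 else none) := by
  rw [pvGroupRuns, List.filterMap_cons]
  simp only [if_neg (by simp [hx] : ¬ ((x == (1:Int)) = true))]
  exact pvEmit_dropWhile x hx xs

lemma pvALoop_consume (xs : List Int) (groups : List Int) (c : Int) (hc : 0 < c) :
    pvALoop xs groups c =
      match xs.dropWhile (· == (1:Int)) with
      | [] => groups ++ [c + ((xs.takeWhile (· == (1:Int))).length : Int)]
      | _ :: r' =>
          pvALoop r' (groups ++ [c + ((xs.takeWhile (· == (1:Int))).length : Int)]) 0 := by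
  induction xs generalizing groups c with
  | nil => simp [pvALoop, hc]
  | cons y ys ih =>
    by_cases hy : y = 1
    · subst hy
      have step : pvALoop ((1:Int) :: ys) groups c = pvALoop ys groups (c + 1) := by
        simp [pvALoop]
      rw [step, ih groups (c + 1) (by omega)]
      have h1 : ((1:Int) :: ys).dropWhile (· == (1:Int)) = ys.dropWhile (· == (1:Int)) := by
        simp
      have h2 : ((1:Int) :: ys).takeWhile (· == (1:Int)) = 1 :: ys.takeWhile (· == (1:Int)) := by
        simp
      rw [h1, h2]
      have harith : c + 1 + ((ys.takeWhile (· == (1:Int))).length : Int)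
          = c + (((1:Int) :: ys.takeWhile (· == (1:Int))).length : Int) := by
        simp; omega
      cases hdw : ys.dropWhile (· == (1:Int)) with
      | nil => simp [harith]
      | cons z r' => simp [harith]
    · have step : pvALoop (y :: ys) groups c = pvALoop ys (groups ++ [c]) 0 := by
        simp [pvALoop, hy, hc]
      rw [step]
      have hby : (y == (1:Int)) = false := by simpa using hy
      rw [List.dropWhile_cons_of_neg (by simp [hby]), List.takeWhile_cons_of_neg (by simp [hby])]
      simp

lemma pvALoop_main : ∀ (n : ℕ) (xs : List Int) (groups : List Int), xs.length ≤ n →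
    pvALoop xs groups 0 =
      groups ++ (pvGroupRuns xs).filterMap (fun p => if p.1 == 1 then some p.2 else none) := by
  intro n
  induction n with
  | zero =>
    intro xs groups h
    have : xs = [] := List.eq_nil_of_length_eq_zero (Nat.le_zero.mp h)
    subst this
    simp [pvALoop, pvGroupRuns]
  | succ n ih =>
    intro xs groups h
    cases xs with
    | nil => simp [pvALoop, pvGroupRuns]
    | cons x rest =>
      have hrest : rest.length ≤ n := by simpa using h
      by_cases hx : x = 1
      · subst hx
        have step : pvALoop ((1:Int) :: rest) groups 0 = pvALoop rest groups 1 := by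
          simp [pvALoop]
        rw [step, pvALoop_consume rest groups 1 (by omega)]
        conv_rhs => rw [pvGroupRuns]
        rw [List.filterMap_cons]
        have h2 : ((1:Int) :: rest).takeWhile (· == (1:Int)) = 1 :: rest.takeWhile (· == (1:Int)) := by
          simp
        cases hdw : rest.dropWhile (· == (1:Int)) with
        | nil =>
          have hnil : pvGroupRuns ([] : List Int) = [] := by rw [pvGroupRuns]
          simp [hnil]
        | cons z r' =>
          have hz : z ≠ 1 := by
            have := pvDropWhile_head_false hdw
            simpa using this
          have hr' : r'.length ≤ n := by
            have h1 : (z :: r').length ≤ rest.length := by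
              rw [← hdw]; exact List.length_dropWhile_le _ _
            simp at h1
            omega
          have hred : (match z :: r' with
              | [] => groups ++ [1 + ((rest.takeWhile (· == (1:Int))).length : Int)]
              | _ :: r' => pvALoop r' (groups ++ [1 + ((rest.takeWhile (· == (1:Int))).length : Int)]) 0)
              = pvALoop r' (groups ++ [1 + ((rest.takeWhile (· == (1:Int))).length : Int)]) 0 := rfl
          rw [hred, ih r' (groups ++ [1 + ((rest.takeWhile (· == (1:Int))).length : Int)]) hr']
          rw [pvEmit_skip z hz r']
          simp
      · have step : pvALoop (x :: rest) groups 0 = pvALoop rest groups 0 := by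
          simp [pvALoop, hx]
        rw [step, ih rest groups hrest, pvEmit_skip x hx rest]

-- ===== VERDICT (by name: the statement is the Claim_ definition above) =====
theorem extract_groups_spec : Claim_equal_extract_groups := by
  intro line _
  unfold Spec_extract_groups extract_groups extract_groups_alt
  simpa using pvALoop_main line.length line [] le_rfl
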